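-- pv_equiv track=rewrite | github.com/fraware/Occupational-Transition | scripts/build_crosswalks.py | occ22_from_soc_major
-- ===== SOURCE A (Python) =====
-- SOC_MAJOR_LABELS: dict[str, str] = {
--     "11-0000": "Management Occupations",
--     "13-0000": "Business and Financial Operations Occupations",
--     "15-0000": "Computer and Mathematical Occupations",
--     "17-0000": "Architecture and Engineering Occupations",
--     "19-0000": "Life, Physical, and Social Science Occupations",
--     "21-0000": "Community and Social Service Occupations",
--     "23-0000": "Legal Occupations",
--     "25-0000": "Educational Instruction and Library Occupations",
--     "27-0000": "Arts, Design, Entertainment, Sports, and Media Occupations",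
--     "29-0000": "Healthcare Practitioners and Technical Occupations",
--     "31-0000": "Healthcare Support Occupations",
--     "33-0000": "Protective Service Occupations",
--     "35-0000": "Food Preparation and Serving Related Occupations",
--     "37-0000": "Building and Grounds Cleaning and Maintenance Occupations",
--     "39-0000": "Personal Care and Service Occupations",
--     "41-0000": "Sales and Related Occupations",
--     "43-0000": "Office and Administrative Support Occupations",
--     "45-0000": "Farming, Fishing, and Forestry Occupations",
--     "47-0000": "Construction and Extraction Occupations",
--     "49-0000": "Installation, Maintenance, and Repair Occupations",
--     "51-0000": "Production Occupations",
--     "53-0000": "Transportation and Material Moving Occupations",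
--     "55-0000": "Military Specific Occupations",
-- }
--
-- def occ22_from_soc_major(major: str | None) -> tuple[int | None, str | None, bool]:
--     if major is None:
--         return None, None, False
--     if major == "55-0000":
--         return None, None, True
--     ordered = [m for m in SOC_MAJOR_LABELS if m != "55-0000"]
--     if major not in ordered:
--         return None, None, False
--     idx = ordered.index(major) + 1
--     return idx, SOC_MAJOR_LABELS[major], False
-- ===== SOURCE B (Python) =====
-- SOC_MAJOR_LABELS: dict[str, str] = {
--     "11-0000": "Management Occupations",
--     "13-0000": "Business and Financial Operations Occupations",
--     "15-0000": "Computer and Mathematical Occupations",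
--     "17-0000": "Architecture and Engineering Occupations",
--     "19-0000": "Life, Physical, and Social Science Occupations",
--     "21-0000": "Community and Social Service Occupations",
--     "23-0000": "Legal Occupations",
--     "25-0000": "Educational Instruction and Library Occupations",
--     "27-0000": "Arts, Design, Entertainment, Sports, and Media Occupations",
--     "29-0000": "Healthcare Practitioners and Technical Occupations",
--     "31-0000": "Healthcare Support Occupations",
--     "33-0000": "Protective Service Occupations",
--     "35-0000": "Food Preparation and Serving Related Occupations",
--     "37-0000": "Building and Grounds Cleaning and Maintenance Occupations",
--     "39-0000": "Personal Care and Service Occupations",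
--     "41-0000": "Sales and Related Occupations",
--     "43-0000": "Office and Administrative Support Occupations",
--     "45-0000": "Farming, Fishing, and Forestry Occupations",
--     "47-0000": "Construction and Extraction Occupations",
--     "49-0000": "Installation, Maintenance, and Repair Occupations",
--     "51-0000": "Production Occupations",
--     "53-0000": "Transportation and Material Moving Occupations",
--     "55-0000": "Military Specific Occupations",
-- }
--
-- def occ22_from_soc_major(major: str | None) -> tuple[int | None, str | None, bool]:
--     if major is None:
--         return None, None, False
--     if major == "55-0000":
--         return None, None, True
--     label = SOC_MAJOR_LABELS.get(major)
--     if label is None: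
--         return None, None, False
--     # civilian SOC majors are the odd codes 11, 13, ..., 53: rank them in closed form
--     idx = (int(major[:2]) - 11) // 2 + 1
--     return idx, label, False
-- ===== Notes on version B (the rewrite author's own statement) =====
-- stated objective: simpler
-- what changed: B replaces A's rebuilt ordered list and linear .index scan with a single dict lookup plus a closed-form rank (int(major[:2]) - 11) // 2 + 1 derived from the regular SOC major numbering.
import Mathlib
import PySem

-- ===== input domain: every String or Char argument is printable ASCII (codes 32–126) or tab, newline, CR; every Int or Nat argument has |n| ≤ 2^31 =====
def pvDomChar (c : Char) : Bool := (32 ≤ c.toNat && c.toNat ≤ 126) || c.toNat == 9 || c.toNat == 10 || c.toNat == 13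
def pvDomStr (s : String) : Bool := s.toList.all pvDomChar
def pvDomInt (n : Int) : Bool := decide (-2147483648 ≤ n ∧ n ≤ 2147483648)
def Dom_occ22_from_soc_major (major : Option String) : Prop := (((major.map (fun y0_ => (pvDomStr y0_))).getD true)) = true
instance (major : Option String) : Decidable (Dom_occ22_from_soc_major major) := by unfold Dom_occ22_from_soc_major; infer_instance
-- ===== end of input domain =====

-- B replaces A's rebuilt ordered list and linear .index scan with a dict lookup plus a
-- closed-form rank from the regular SOC major numbering (simpler; same observable behaviour).


-- ===== PORT A =====
def socMajorLabels : PySem.Dict String String := PySem.Dict.ofList [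
    ("11-0000", "Management Occupations"),
    ("13-0000", "Business and Financial Operations Occupations"),
    ("15-0000", "Computer and Mathematical Occupations"),
    ("17-0000", "Architecture and Engineering Occupations"),
    ("19-0000", "Life, Physical, and Social Science Occupations"),
    ("21-0000", "Community and Social Service Occupations"),
    ("23-0000", "Legal Occupations"),
    ("25-0000", "Educational Instruction and Library Occupations"),
    ("27-0000", "Arts, Design, Entertainment, Sports, and Media Occupations"),
    ("29-0000", "Healthcare Practitioners and Technical Occupations"),
    ("31-0000", "Healthcare Support Occupations"),
    ("33-0000", "Protective Service Occupations"),
    ("35-0000", "Food Preparation and Serving Related Occupations"),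
    ("37-0000", "Building and Grounds Cleaning and Maintenance Occupations"),
    ("39-0000", "Personal Care and Service Occupations"),
    ("41-0000", "Sales and Related Occupations"),
    ("43-0000", "Office and Administrative Support Occupations"),
    ("45-0000", "Farming, Fishing, and Forestry Occupations"),
    ("47-0000", "Construction and Extraction Occupations"),
    ("49-0000", "Installation, Maintenance, and Repair Occupations"),
    ("51-0000", "Production Occupations"),
    ("53-0000", "Transportation and Material Moving Occupations"),
    ("55-0000", "Military Specific Occupations")
]

def occ22_from_soc_major (major : Option String) : Option Int × Option String × Bool :=
  match major with
  | none => (none, none, false)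
  | some m =>
    if m = "55-0000" then (none, none, true)
    else
      let ordered := socMajorLabels.keys.filter (fun k => decide (k ≠ "55-0000"))
      if m ∉ ordered then (none, none, false)
      else
        -- ordered.index(major): membership was just checked, so index? is some; KeyError impossible
        let idx : Int := ((PySem.List.index? ordered m).getD 0 : Nat) + 1
        (some idx, socMajorLabels.get? m, false)

-- ===== PORT B =====
def occ22_from_soc_major_alt (major : Option String) : Option Int × Option String × Bool :=
  match major with
  | none => (none, none, false)
  | some m =>
    if m = "55-0000" then (none, none, true)
    else
      match socMajorLabels.get? m with
      | none => (none, none, false)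
      | some label =>
        -- int(m[:2]) cannot raise: m is a key of the dict, so m[:2] is two decimal digits
        let n : Int := (PySem.Int.ofStr? (PySem.Str.slice m none (some 2))).getD 0
        (some (PySem.Int.floordiv (n - 11) 2 + 1), some label, false)

-- ===== PRECONDITION & SPEC =====
def Spec_occ22_from_soc_major (major : Option String) (out : Option Int × Option String × Bool) : Prop := out = occ22_from_soc_major_alt major
instance (major : Option String) (out : Option Int × Option String × Bool) : Decidable (Spec_occ22_from_soc_major major out) := by unfold Spec_occ22_from_soc_major; infer_instance

-- ===== CLAIM (what is proved, stated in full; the proofs are below) =====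
def Claim_equal_occ22_from_soc_major : Prop := ∀ (major : Option String), Dom_occ22_from_soc_major major → Spec_occ22_from_soc_major major (occ22_from_soc_major major)

-- ===== LEMMAS AND PROOFS =====

-- the 23 keys of the labels dict, as a literal list
def socKeys : List String := ["11-0000", "13-0000", "15-0000", "17-0000", "19-0000", "21-0000",
  "23-0000", "25-0000", "27-0000", "29-0000", "31-0000", "33-0000", "35-0000", "37-0000",
  "39-0000", "41-0000", "43-0000", "45-0000", "47-0000", "49-0000", "51-0000", "53-0000", "55-0000"]

lemma keys_socMajorLabels : socMajorLabels.keys = socKeys := by decide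

lemma get?_none_of_not_mem (m : String) (h : m ∉ socKeys) : socMajorLabels.get? m = none := by
  rw [PySem.Dict.get?_eq_none_iff_not_mem_keys, keys_socMajorLabels]
  exact h

-- ===== VERDICT (by name: the statement is the Claim_ definition above) =====
theorem occ22_from_soc_major_spec : Claim_equal_occ22_from_soc_major := by
  intro major _
  unfold Spec_occ22_from_soc_major
  match major with
  | none => rfl
  | some m =>
    by_cases hmem : m ∈ socKeys
    · simp only [socKeys, List.mem_cons, List.not_mem_nil, or_false] at hmem
      rcases hmem with rfl|rfl|rfl|rfl|rfl|rfl|rfl|rfl|rfl|rfl|rfl|rfl|rfl|rfl|rfl|rfl|rfl|rfl|rfl|rfl|rfl|rfl|rfl <;> decide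
    · have h55 : m ≠ "55-0000" := by
        intro h; exact hmem (h ▸ (by decide : "55-0000" ∈ socKeys))
      simp [occ22_from_soc_major, occ22_from_soc_major_alt, h55,
        get?_none_of_not_mem m hmem]
      exact fun h => hmem (keys_socMajorLabels ▸ h)
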